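-- pv_equiv track=rewrite | github.com/uppeabhishek/CSCI6057-CODECLONEDETECTION | CodeRepeats/CommonAlgorithms/FastSuffixArray.py | get_suffix_types
-- ===== SOURCE A (Python) =====
-- def get_suffix_types(data):
--     array = [False] * (len(data) + 1)
--     array[len(data)] = True
--     if len(data) == 0:
--         return array
--     array[len(data) - 1] = False
--     for i in range(len(data) - 2, -1, -1):
--         if data[i] < data[i + 1]:
--             array[i] = True
--         elif data[i] > data[i + 1]:
--             array[i] = False
--         else:
--             array[i] = array[i + 1]
--
--     return array
-- ===== SOURCE B (Python) =====
-- def get_suffix_types(data):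
--     # Direct definition: position i is S-type iff suffix data[i:] < data[i+1:]
--     # lexicographically; the empty sentinel suffix is S-type.
--     return [data[i:] < data[i + 1:] for i in range(len(data))] + [True]
-- ===== Notes on version B (the rewrite author's own statement) =====
-- stated objective: simpler
-- what changed: Replaces A's backward dynamic-programming pass (propagating the successor's type on equal characters) with a one-line direct definition: position i is S-type iff suffix data[i:] is lexicographically less than data[i+1:], plus the sentinel True.
import Mathlib
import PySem

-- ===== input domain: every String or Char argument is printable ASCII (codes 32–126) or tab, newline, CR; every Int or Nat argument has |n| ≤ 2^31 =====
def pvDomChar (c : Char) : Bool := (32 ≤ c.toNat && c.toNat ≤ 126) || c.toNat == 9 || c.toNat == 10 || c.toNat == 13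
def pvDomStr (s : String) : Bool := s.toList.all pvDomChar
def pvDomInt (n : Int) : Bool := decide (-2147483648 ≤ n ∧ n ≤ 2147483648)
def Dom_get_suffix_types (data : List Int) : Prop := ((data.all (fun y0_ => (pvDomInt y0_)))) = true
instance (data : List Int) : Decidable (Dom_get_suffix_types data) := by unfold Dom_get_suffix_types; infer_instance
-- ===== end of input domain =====

-- B computes each type directly as a lexicographic suffix comparison instead of A's backward DP pass.

-- ===== PORT A =====
-- A's backward `for i in range(len(data)-2, -1, -1)` loop as a counter recursion:
-- `loopA data m arr` performs the loop body for i = m-1, m-2, …, 0 (called with m = n-1).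
def loopA (data : List Int) : Nat → List Bool → List Bool
  | 0, arr => arr
  | m + 1, arr =>
      let arr' :=
        if data.getD m 0 < data.getD (m + 1) 0 then arr.set m true
        else if data.getD (m + 1) 0 < data.getD m 0 then arr.set m false
        else arr.set m (arr.getD (m + 1) false)
      loopA data m arr'

def get_suffix_types (data : List Int) : List Bool :=
  let n := data.length
  let array := (List.replicate (n + 1) false).set n true
  if n = 0 then array
  else loopA data (n - 1) (array.set (n - 1) false)

-- ===== PORT B =====
def get_suffix_types_alt (data : List Int) : List Bool :=
  ((List.range data.length).map (fun i => decide (data.drop i < data.drop (i + 1)))) ++ [true]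

-- ===== PRECONDITION & SPEC =====
def Spec_get_suffix_types (data : List Int) (out : List Bool) : Prop := out = get_suffix_types_alt data
instance (data : List Int) (out : List Bool) : Decidable (Spec_get_suffix_types data out) := by unfold Spec_get_suffix_types; infer_instance

-- ===== CLAIM (what is proved, stated in full; the proofs are below) =====
def Claim_equal_get_suffix_types : Prop := ∀ (data : List Int), Dom_get_suffix_types data → Spec_get_suffix_types data (get_suffix_types data)

-- ===== LEMMAS AND PROOFS =====

-- Python/Mathlib list `<` on a cons pair, for a linear order.
theorem cons_lt_cons_iff_int (a b : Int) (s t : List Int) :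
    (a :: s) < (b :: t) ↔ (a < b ∨ (a = b ∧ s < t)) := by
  constructor
  · intro h
    cases h with
    | cons h => exact Or.inr ⟨rfl, h⟩
    | rel h => exact Or.inl h
  · rintro (h | ⟨rfl, h⟩)
    · exact List.Lex.rel h
    · exact List.Lex.cons h

theorem not_cons_lt_nil_int (a : Int) (s : List Int) : ¬ ((a :: s) < ([] : List Int)) := by
  intro h; cases h

-- the per-position value B computes
def bval (data : List Int) (i : Nat) : Bool := decide (data.drop i < data.drop (i + 1))

theorem bval_last (data : List Int) (h : 0 < data.length) :
    bval data (data.length - 1) = false := by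
  have h1 : data.length - 1 < data.length := by omega
  have hd : data.drop (data.length - 1) = data[data.length - 1] :: data.drop (data.length - 1 + 1) :=
    List.drop_eq_getElem_cons h1
  have hn : data.length - 1 + 1 = data.length := by omega
  simp only [bval, hd, hn, List.drop_length]
  simp only [decide_eq_false_iff_not]
  exact not_cons_lt_nil_int _ _

theorem suffix_lt_iff (data : List Int) (m : Nat) (h : m + 1 < data.length) :
    (data.drop m < data.drop (m + 1)) ↔
      (data[m]'(by omega) < data[m + 1]'h ∨
       (data[m]'(by omega) = data[m + 1]'h ∧ data.drop (m + 1) < data.drop (m + 2))) := by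
  have hd1 : data.drop m = data[m]'(by omega) :: data.drop (m + 1) :=
    List.drop_eq_getElem_cons (by omega)
  have hd2 : data.drop (m + 1) = data[m + 1]'h :: data.drop (m + 2) :=
    List.drop_eq_getElem_cons h
  rw [hd1, hd2]
  exact cons_lt_cons_iff_int _ _ _ _

theorem bval_rec (data : List Int) (m : Nat) (h : m + 1 < data.length) :
    bval data m =
      if data[m]'(by omega) < data[m + 1]'h then true
      else if data[m + 1]'h < data[m]'(by omega) then false
      else bval data (m + 1) := by
  unfold bval
  rw [show m + 1 + 1 = m + 2 from rfl]
  rcases lt_trichotomy (data[m]'(by omega : m < data.length)) (data[m + 1]'h) with hlt | heq | hgt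
  · simp [suffix_lt_iff data m h, hlt]
  · simp only [heq, lt_irrefl, if_false]
    rw [decide_eq_decide, suffix_lt_iff data m h, heq]
    simp
  · rw [if_neg (not_lt_of_gt hgt), if_pos hgt]
    simp only [decide_eq_false_iff_not, suffix_lt_iff data m h]
    rintro (h' | ⟨he, -⟩)
    · exact absurd h' (not_lt_of_gt hgt)
    · exact hgt.ne' he

-- B's output read positionwise via getD
theorem alt_getD_lt (data : List Int) (j : Nat) (hj : j < data.length) :
    (get_suffix_types_alt data).getD j false = bval data j := by
  unfold get_suffix_types_alt
  rw [List.getD_eq_getElem _ _ (by simp; omega)]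
  rw [List.getElem_append_left (by simp [hj])]
  simp [bval]

theorem alt_getD_len (data : List Int) :
    (get_suffix_types_alt data).getD data.length false = true := by
  unfold get_suffix_types_alt
  rw [List.getD_eq_getElem _ _ (by simp)]
  rw [List.getElem_append_right (by simp)]
  simp

theorem alt_length (data : List Int) :
    (get_suffix_types_alt data).length = data.length + 1 := by
  simp [get_suffix_types_alt]

-- loop invariant: once positions ≥ m of arr already hold B's values, running the
-- backward loop from index m-1 yields exactly B's list.
theorem loopA_eq (data : List Int) :
    ∀ (m : Nat) (arr : List Bool), m < data.length → arr.length = data.length + 1 →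
      (∀ j, m ≤ j → j ≤ data.length →
        arr.getD j false = (get_suffix_types_alt data).getD j false) →
      loopA data m arr = get_suffix_types_alt data := by
  intro m
  induction m with
  | zero =>
    intro arr _ hlen hag
    simp only [loopA]
    apply List.ext_getElem (by rw [hlen, alt_length])
    intro j hj1 hj2
    have hj : j ≤ data.length := by rw [hlen] at hj1; omega
    have := hag j (Nat.zero_le j) hj
    rwa [List.getD_eq_getElem _ _ hj1, List.getD_eq_getElem _ _ hj2] at this
  | succ m ih =>
    intro arr hm hlen hag
    have hmlt : m < data.length := by omega
    have hm1 : m + 1 < data.length + 1 := by omega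
    rw [loopA]
    have hgm : data.getD m 0 = data[m]'hmlt := List.getD_eq_getElem _ _ hmlt
    have hgm1 : data.getD (m + 1) 0 = data[m + 1]'hm := List.getD_eq_getElem _ _ hm
    -- the value written at position m is bval data m
    have hrec := bval_rec data m hm
    set v : Bool :=
      if data.getD m 0 < data.getD (m + 1) 0 then true
      else if data.getD (m + 1) 0 < data.getD m 0 then false
      else arr.getD (m + 1) false with hv
    have harr' :
      (if data.getD m 0 < data.getD (m + 1) 0 then arr.set m true
       else if data.getD (m + 1) 0 < data.getD m 0 then arr.set m false
       else arr.set m (arr.getD (m + 1) false)) = arr.set m v := by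
      rw [hv]; split_ifs <;> rfl
    have hvval : v = bval data m := by
      rw [hv, hrec, hgm, hgm1]
      split_ifs with h1 h2
      · rfl
      · rfl
      · rw [hag (m + 1) (le_refl _) (by omega), alt_getD_lt data (m + 1) hm]
    simp only [harr']
    apply ih (arr.set m v) hmlt (by simp [hlen])
    intro j hj1 hj2
    by_cases hjm : j = m
    · subst hjm
      rw [List.getD_eq_getElem _ _ (by simp only [List.length_set, hlen]; omega),
        List.getElem_set_self (by simp only [List.length_set, hlen]; omega), hvval, alt_getD_lt data j hmlt]
    · have : j < arr.length := by rw [hlen]; omega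
      rw [List.getD_eq_getElem _ _ (by simpa only [List.length_set] using this),
        List.getElem_set_ne (by omega), ← List.getD_eq_getElem _ _ this]
      exact hag j (by omega) hj2

-- ===== VERDICT (by name: the statement is the Claim_ definition above) =====
theorem get_suffix_types_spec : Claim_equal_get_suffix_types := by
  intro data _
  unfold Spec_get_suffix_types get_suffix_types
  by_cases h0 : data.length = 0
  · have : data = [] := List.length_eq_zero_iff.mp h0
    subst this
    simp [get_suffix_types_alt]
  · have hn : 0 < data.length := Nat.pos_of_ne_zero h0
    simp only [if_neg h0]
    apply loopA_eq data (data.length - 1) _ (by omega) (by simp)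
    intro j hj1 hj2
    by_cases hje : j = data.length
    · subst hje
      rw [alt_getD_len data,
        List.getD_eq_getElem _ _ (by simp),
        List.getElem_set_ne (by omega), List.getElem_set_self (by simp)]
    · have hj : j = data.length - 1 := by omega
      subst hj
      rw [alt_getD_lt data _ (by omega), bval_last data hn,
        List.getD_eq_getElem _ _ (by simp), List.getElem_set_self (by simp)]
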